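-- pv_equiv track=rewrite | github.com/m4465349-ops/DWS-MolAF | dynamic weighting mechanism.py | count_feature_types
-- ===== SOURCE A (Python) =====
-- def count_feature_types(selected_indices, feature_names):
--     maccs_indices = list(range(0, 167))
--     erg_indices = list(range(167, 608))
--     pubchem_indices = list(range(608, 1489))
--     ecfp4_indices = list(range(1489, 2513))
--
--     maccs_count = 0
--     erg_count = 0
--     pubchem_count = 0
--     ecfp4_count = 0
--
--     for idx in selected_indices:
--         if idx in maccs_indices:
--             maccs_count += 1
--         elif idx in erg_indices:
--             erg_count += 1
--         elif idx in pubchem_indices: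
--             pubchem_count += 1
--         elif idx in ecfp4_indices:
--             ecfp4_count += 1
--
--     return {
--         'MACCS': maccs_count,
--         'ErG': erg_count,
--         'PubChem': pubchem_count,
--         'ECFP4': ecfp4_count
--     }
-- ===== SOURCE B (Python) =====
-- def count_feature_types(selected_indices, feature_names):
--     def within(lo, hi):
--         return sum(1 for idx in selected_indices if lo <= idx < hi)
--     return {
--         'MACCS': within(0, 167),
--         'ErG': within(167, 608),
--         'PubChem': within(608, 1489),
--         'ECFP4': within(1489, 2513),
--     }
-- ===== Notes on version B (the rewrite author's own statement) =====
-- stated objective: faster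
-- what changed: Replaces the single loop with four list-membership tests against materialised range lists by four closed-interval comparison counts (sum over a generator per category), removing the O(2513) inner scans.
import Mathlib
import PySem

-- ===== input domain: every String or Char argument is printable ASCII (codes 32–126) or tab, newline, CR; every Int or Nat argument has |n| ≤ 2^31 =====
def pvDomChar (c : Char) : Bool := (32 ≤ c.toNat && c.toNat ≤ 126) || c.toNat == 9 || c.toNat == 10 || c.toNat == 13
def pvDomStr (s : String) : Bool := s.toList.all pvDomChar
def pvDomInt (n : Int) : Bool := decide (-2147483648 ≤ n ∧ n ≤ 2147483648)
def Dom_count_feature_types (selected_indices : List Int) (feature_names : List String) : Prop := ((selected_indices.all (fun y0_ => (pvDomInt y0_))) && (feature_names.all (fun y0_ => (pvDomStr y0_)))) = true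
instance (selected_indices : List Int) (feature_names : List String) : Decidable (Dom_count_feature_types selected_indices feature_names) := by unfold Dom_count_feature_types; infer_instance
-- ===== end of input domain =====

-- B replaces the loop over four materialised range lists by four direct interval-comparison counts (faster; a timing run measures the speedup).

-- ===== PORT A =====
def count_feature_types (selected_indices : List Int) (feature_names : List String) : List (String × Int) :=
  let maccs_indices := PySem.List.pyRange 0 167 1
  let erg_indices := PySem.List.pyRange 167 608 1
  let pubchem_indices := PySem.List.pyRange 608 1489 1
  let ecfp4_indices := PySem.List.pyRange 1489 2513 1
  let counts := selected_indices.foldl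
    (fun (c : Int × Int × Int × Int) idx =>
      if idx ∈ maccs_indices then (c.1 + 1, c.2.1, c.2.2.1, c.2.2.2)
      else if idx ∈ erg_indices then (c.1, c.2.1 + 1, c.2.2.1, c.2.2.2)
      else if idx ∈ pubchem_indices then (c.1, c.2.1, c.2.2.1 + 1, c.2.2.2)
      else if idx ∈ ecfp4_indices then (c.1, c.2.1, c.2.2.1, c.2.2.2 + 1)
      else c)
    (0, 0, 0, 0)
  [("MACCS", counts.1), ("ErG", counts.2.1), ("PubChem", counts.2.2.1), ("ECFP4", counts.2.2.2)]

-- ===== PORT B =====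
-- within lo hi = sum(1 for idx in selected_indices if lo <= idx < hi), i.e. a countP
def count_feature_types_alt (selected_indices : List Int) (feature_names : List String) : List (String × Int) :=
  let within := fun (lo hi : Int) =>
    ((selected_indices.countP (fun idx => decide (lo ≤ idx ∧ idx < hi)) : Nat) : Int)
  [("MACCS", within 0 167), ("ErG", within 167 608),
   ("PubChem", within 608 1489), ("ECFP4", within 1489 2513)]

-- ===== PRECONDITION & SPEC =====
def Spec_count_feature_types (selected_indices : List Int) (feature_names : List String) (out : List (String × Int)) : Prop := out = count_feature_types_alt selected_indices feature_names
instance (selected_indices : List Int) (feature_names : List String) (out : List (String × Int)) : Decidable (Spec_count_feature_types selected_indices feature_names out) := by unfold Spec_count_feature_types; infer_instance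

-- ===== CLAIM (what is proved, stated in full; the proofs are below) =====
def Claim_equal_count_feature_types : Prop := ∀ (selected_indices : List Int) (feature_names : List String), Dom_count_feature_types selected_indices feature_names → Spec_count_feature_types selected_indices feature_names (count_feature_types selected_indices feature_names)

-- ===== LEMMAS AND PROOFS =====

-- Loop invariant: the fold over interval conditions accumulates the four interval counts.
theorem cft_fold_eq (l : List Int) (a b c d : Int) :
    l.foldl
      (fun (c : Int × Int × Int × Int) idx =>
        if (0:Int) ≤ idx ∧ idx < 167 then (c.1 + 1, c.2.1, c.2.2.1, c.2.2.2)
        else if (167:Int) ≤ idx ∧ idx < 608 then (c.1, c.2.1 + 1, c.2.2.1, c.2.2.2)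
        else if (608:Int) ≤ idx ∧ idx < 1489 then (c.1, c.2.1, c.2.2.1 + 1, c.2.2.2)
        else if (1489:Int) ≤ idx ∧ idx < 2513 then (c.1, c.2.1, c.2.2.1, c.2.2.2 + 1)
        else c)
      (a, b, c, d)
    = (a + (l.countP (fun i => decide ((0:Int) ≤ i ∧ i < 167)) : Int),
       b + (l.countP (fun i => decide ((167:Int) ≤ i ∧ i < 608)) : Int),
       c + (l.countP (fun i => decide ((608:Int) ≤ i ∧ i < 1489)) : Int),
       d + (l.countP (fun i => decide ((1489:Int) ≤ i ∧ i < 2513)) : Int)) := by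
  induction l generalizing a b c d with
  | nil => simp [List.countP]
  | cons x xs ih =>
    simp only [List.foldl_cons, List.countP_cons]
    by_cases h1 : (0:Int) ≤ x ∧ x < 167 <;>
    by_cases h2 : (167:Int) ≤ x ∧ x < 608 <;>
    by_cases h3 : (608:Int) ≤ x ∧ x < 1489 <;>
    by_cases h4 : (1489:Int) ≤ x ∧ x < 2513 <;>
    first
      | exact absurd h2 (by omega)
      | exact absurd h3 (by omega)
      | exact absurd h4 (by omega)
      | (simp only [h1, h2, h3, h4, decide_true, decide_false, and_self, if_true, if_false,
           ite_true, ite_false, eq_self_iff_true]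
         rw [ih]; push_cast; ring_nf)

-- ===== VERDICT (by name: the statement is the Claim_ definition above) =====
theorem count_feature_types_spec : Claim_equal_count_feature_types := by
  intro sel fn _
  show count_feature_types sel fn = count_feature_types_alt sel fn
  have hfun :
      (fun (c : Int × Int × Int × Int) idx =>
        if idx ∈ PySem.List.pyRange 0 167 1 then (c.1 + 1, c.2.1, c.2.2.1, c.2.2.2)
        else if idx ∈ PySem.List.pyRange 167 608 1 then (c.1, c.2.1 + 1, c.2.2.1, c.2.2.2)
        else if idx ∈ PySem.List.pyRange 608 1489 1 then (c.1, c.2.1, c.2.2.1 + 1, c.2.2.2)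
        else if idx ∈ PySem.List.pyRange 1489 2513 1 then (c.1, c.2.1, c.2.2.1, c.2.2.2 + 1)
        else c)
      = (fun (c : Int × Int × Int × Int) idx =>
        if (0:Int) ≤ idx ∧ idx < 167 then (c.1 + 1, c.2.1, c.2.2.1, c.2.2.2)
        else if (167:Int) ≤ idx ∧ idx < 608 then (c.1, c.2.1 + 1, c.2.2.1, c.2.2.2)
        else if (608:Int) ≤ idx ∧ idx < 1489 then (c.1, c.2.1, c.2.2.1 + 1, c.2.2.2)
        else if (1489:Int) ≤ idx ∧ idx < 2513 then (c.1, c.2.1, c.2.2.1, c.2.2.2 + 1)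
        else c) := by
    funext c idx
    simp only [PySem.List.mem_pyRange_one]
  simp only [count_feature_types, count_feature_types_alt]
  rw [hfun, cft_fold_eq]
  norm_num
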